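-- pv_equiv track=rewrite | github.com/yangence/circfull | script/circfull/annoFL.py | locatePos
-- ===== SOURCE A (Python) =====
-- def locatePos(geneExon,pos):
--     ref_start=[i[0]+1 for i in geneExon]
--     ref_end=[i[1] for i in geneExon]
--     ref_num=len(ref_start)
--     judgeBody='intron'
--     for i in range(ref_num):
--         if (ref_start[i]<pos) and (ref_end[i]>pos):
--             judgeBody='inE'
--     return(judgeBody)
-- ===== SOURCE B (Python) =====
-- def locatePos(geneExon, pos):
--     # Sort the (open) intervals by start, take prefix maxima of ends, then one
--     # binary search: pos is inside some exon iff among the intervals whose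
--     # start is < pos (a prefix of the sorted order) the maximal end is > pos.
--     ivs = sorted([(e[0] + 1, e[1]) for e in geneExon], key=lambda p: p[0])
--     prefmax = []
--     m = None
--     for s, t in ivs:
--         if m is None or t > m:
--             m = t
--         prefmax.append(m)
--     lo = 0
--     hi = len(ivs)
--     while lo < hi:
--         mid = (lo + hi) // 2
--         if ivs[mid][0] < pos:
--             lo = mid + 1
--         else:
--             hi = mid
--     if lo > 0 and prefmax[lo - 1] > pos:
--         return 'inE'
--     return 'intron'
-- ===== Notes on version B (the rewrite author's own statement) =====
-- stated objective: alternative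
-- what changed: Replaces A's linear flag-overwriting scan over index lists by sorting the (start+1,end) pairs by start, precomputing prefix maxima of ends, and answering with one binary search: pos is in an exon iff the maximal end among the prefix of intervals with start < pos exceeds pos.
import Mathlib
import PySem

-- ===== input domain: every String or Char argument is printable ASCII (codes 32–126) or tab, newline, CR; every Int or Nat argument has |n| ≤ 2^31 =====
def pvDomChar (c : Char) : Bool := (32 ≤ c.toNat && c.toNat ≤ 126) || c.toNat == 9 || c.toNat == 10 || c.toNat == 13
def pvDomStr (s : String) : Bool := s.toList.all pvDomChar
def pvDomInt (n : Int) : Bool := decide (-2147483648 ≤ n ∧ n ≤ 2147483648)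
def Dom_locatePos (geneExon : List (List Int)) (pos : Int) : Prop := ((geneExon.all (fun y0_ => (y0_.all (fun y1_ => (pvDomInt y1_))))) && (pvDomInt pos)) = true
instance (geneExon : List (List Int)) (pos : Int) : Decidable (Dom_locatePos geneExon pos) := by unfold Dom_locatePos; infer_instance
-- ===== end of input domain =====

-- B replaces A's linear flag-overwriting scan by sort-by-start + prefix maxima of ends + one binary search; objective: alternative (different algorithm, not faster for a single query).


-- ===== PORT A =====
def locatePos (geneExon : List (List Int)) (pos : Int) : String :=
  let ref_start := geneExon.map (fun i => PySem.List.pyGetD i 0 0 + 1)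
  let ref_end := geneExon.map (fun i => PySem.List.pyGetD i 1 0)
  let ref_num : Int := (ref_start.length : Int)
  (PySem.List.pyRange 0 ref_num 1).foldl
    (fun judgeBody i =>
      if PySem.List.pyGetD ref_start i 0 < pos ∧ pos < PySem.List.pyGetD ref_end i 0
      then "inE" else judgeBody)
    "intron"

-- ===== PORT B =====
-- the 'while lo < hi' binary-search loop of Source B; lo and hi are always ≥ 0 in the
-- Python, so Nat with Nat division is exact for Python's (lo+hi)//2.
def pvLowerBound (ivs : List (Int × Int)) (pos : Int) : Nat → Nat → Nat → Nat
  | 0, lo, _ => lo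
  | fuel + 1, lo, hi =>
    if lo < hi then
      let mid := (lo + hi) / 2
      if (PySem.List.pyGetD ivs (mid : Int) (0, 0)).1 < pos then pvLowerBound ivs pos fuel (mid + 1) hi
      else pvLowerBound ivs pos fuel lo mid
    else lo

def locatePos_alt (geneExon : List (List Int)) (pos : Int) : String :=
  let ivs := PySem.List.sorted
    (geneExon.map (fun e => (PySem.List.pyGetD e 0 0 + 1, PySem.List.pyGetD e 1 0)))
    (fun p => p.1)
  let prefmax := (ivs.foldl
    (fun (acc : List Int × Option Int) p =>
      let m := match acc.2 with
        | none => p.2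
        | some m0 => if p.2 > m0 then p.2 else m0
      (acc.1 ++ [m], some m))
    ([], none)).1
  let lo := pvLowerBound ivs pos ivs.length 0 ivs.length
  if 0 < lo ∧ pos < PySem.List.pyGetD prefmax ((lo : Int) - 1) 0 then "inE" else "intron"

-- ===== PRECONDITION & SPEC =====
-- Pre_ excludes exon records with fewer than 2 fields, on which A raises IndexError (e[0]/e[1]).
def Pre_locatePos (geneExon : List (List Int)) (pos : Int) : Prop :=
  ∀ e ∈ geneExon, 2 ≤ e.length
instance (geneExon : List (List Int)) (pos : Int) : Decidable (Pre_locatePos geneExon pos) := by unfold Pre_locatePos; infer_instance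
def pvWitness_locatePos : List (List Int) × Int := ([[1, 10], [20, 30]], 5)
def Spec_locatePos (geneExon : List (List Int)) (pos : Int) (out : String) : Prop := out = locatePos_alt geneExon pos
instance (geneExon : List (List Int)) (pos : Int) (out : String) : Decidable (Spec_locatePos geneExon pos out) := by unfold Spec_locatePos; infer_instance

-- ===== CLAIM (what is proved, stated in full; the proofs are below) =====
def Claim_equal_locatePos : Prop := ∀ (geneExon : List (List Int)) (pos : Int), Dom_locatePos geneExon pos → Pre_locatePos geneExon pos → Spec_locatePos geneExon pos (locatePos geneExon pos)

-- ===== LEMMAS AND PROOFS =====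

-- A's flag-setting left fold equals an any-test.
theorem foldl_flag_eq_any (p : List Int → Prop) [DecidablePred p]
    (l : List (List Int)) (acc : String) :
    l.foldl (fun judgeBody e => if p e then "inE" else judgeBody) acc
      = if l.any (fun e => decide (p e)) then "inE" else acc := by
  induction l generalizing acc with
  | nil => simp
  | cons e l ih =>
    simp only [List.foldl_cons, List.any_cons, ih]
    by_cases h : p e <;> simp [h]

-- A equals "inE" iff some exon record strictly contains pos.
theorem locatePos_eq_if (geneExon : List (List Int)) (pos : Int) :
    locatePos geneExon pos
      = if geneExon.any (fun e =>
            decide (PySem.List.pyGetD e 0 0 + 1 < pos ∧ pos < PySem.List.pyGetD e 1 0))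
        then "inE" else "intron" := by
  unfold locatePos
  simp only []
  rw [PySem.List.foldl_congr_mem
        (g := fun judgeBody j =>
          if PySem.List.pyGetD (PySem.List.pyGetD geneExon j ([] : List Int)) 0 0 + 1 < pos ∧
             pos < PySem.List.pyGetD (PySem.List.pyGetD geneExon j ([] : List Int)) 1 0
          then "inE" else judgeBody)]
  · rw [List.length_map]
    rw [PySem.List.foldl_pyRange_zero_pyGetD' geneExon ([] : List Int)
          (fun judgeBody e =>
            if PySem.List.pyGetD e 0 0 + 1 < pos ∧ pos < PySem.List.pyGetD e 1 0
            then "inE" else judgeBody) "intron"]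
    rw [foldl_flag_eq_any (fun e => PySem.List.pyGetD e 0 0 + 1 < pos ∧ pos < PySem.List.pyGetD e 1 0)]
  · intro acc j hj
    rw [PySem.List.mem_pyRange_one] at hj
    obtain ⟨h0, h1⟩ := hj
    simp only [List.length_map] at h1
    rw [PySem.List.pyGetD_eq_getElem _ 0 h0 (by simpa using h1),
        PySem.List.pyGetD_eq_getElem _ 0 h0 (by simpa using h1),
        PySem.List.pyGetD_eq_getElem _ ([] : List Int) h0 (by simpa using h1)]
    simp

-- recursion computing Source B's prefmax list (proof helper for the foldl in the port).
def pvPm : List (Int × Int) → Option Int → List Int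
  | [], _ => []
  | p :: ps, m =>
      let m' := match m with
        | none => p.2
        | some m0 => if p.2 > m0 then p.2 else m0
      m' :: pvPm ps (some m')

theorem foldl_eq_pvPm (ps : List (Int × Int)) (acc : List Int) (m : Option Int) :
    (ps.foldl
      (fun (acc : List Int × Option Int) p =>
        let m := match acc.2 with
          | none => p.2
          | some m0 => if p.2 > m0 then p.2 else m0
        (acc.1 ++ [m], some m))
      (acc, m)).1 = acc ++ pvPm ps m := by
  induction ps generalizing acc m with
  | nil => simp [pvPm]
  | cons p ps ih => simp [pvPm, ih]

-- prefmax[k] > pos iff some end among the first k+1 is > pos (or the carried max already is).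
theorem pvPm_gt (pos : Int) (ps : List (Int × Int)) (m : Option Int) (k : Nat) (hk : k < ps.length) :
    (pos < (pvPm ps m).getD k 0) ↔
      ((∃ m0, m = some m0 ∧ pos < m0) ∨ ∃ i, i ≤ k ∧ pos < (ps.getD i (0, 0)).2) := by
  induction ps generalizing m k with
  | nil => simp at hk
  | cons p ps ih =>
    cases k with
    | zero =>
      simp only [pvPm, List.getD_cons_zero]
      constructor
      · intro h
        cases m with
        | none => exact Or.inr ⟨0, le_refl _, by simpa using h⟩
        | some m0 =>
          simp only at h
          by_cases hc : p.2 > m0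
          · exact Or.inr ⟨0, le_refl _, by simp [hc] at h ⊢; omega⟩
          · exact Or.inl ⟨m0, rfl, by simpa [hc] using h⟩
      · rintro (⟨m0, rfl, hm⟩ | ⟨i, hi0, hi⟩)
        · simp only []; split_ifs with hc <;> omega
        · interval_cases i
          simp only [List.getD_cons_zero] at hi
          cases m with
          | none => simpa using hi
          | some m0 => simp only []; split_ifs with hc <;> omega
    | succ k =>
      have hk' : k < ps.length := by simpa using hk
      simp only [pvPm, List.getD_cons_succ]
      rw [ih _ _ hk']
      constructor
      · rintro (⟨m0, hm0, hlt⟩ | ⟨i, hik, hlt⟩)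
        · cases m with
          | none =>
            simp only [Option.some.injEq] at hm0
            exact Or.inr ⟨0, Nat.zero_le _, by simp; omega⟩
          | some mv =>
            simp only [Option.some.injEq] at hm0
            by_cases hc : p.2 > mv
            · exact Or.inr ⟨0, Nat.zero_le _, by simp only [if_pos hc] at hm0; simp; omega⟩
            · exact Or.inl ⟨mv, rfl, by simp [hc] at hm0; omega⟩
        · exact Or.inr ⟨i + 1, by omega, by simpa using hlt⟩
      · rintro (⟨m0, hm0, hlt⟩ | ⟨i, hik, hlt⟩)
        · subst hm0
          refine Or.inl ⟨_, rfl, ?_⟩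
          simp only []; split_ifs with hc <;> omega
        · cases i with
          | zero =>
            refine Or.inl ⟨_, rfl, ?_⟩
            simp only [List.getD_cons_zero] at hlt
            cases m with
            | none => simpa using hlt
            | some mv => simp only []; split_ifs with hc <;> omega
          | succ i =>
            exact Or.inr ⟨i, by omega, by simpa using hlt⟩

-- binary-search invariant: pvLowerBound returns the boundary between starts < pos and starts ≥ pos.
theorem pvLowerBound_spec (ivs : List (Int × Int)) (pos : Int)
    (hmono : ∀ p q : Nat, p ≤ q → q < ivs.length →
      (ivs.getD p (0, 0)).1 ≤ (ivs.getD q (0, 0)).1) :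
    ∀ n lo hi, hi - lo ≤ n → lo ≤ hi → hi ≤ ivs.length →
    (∀ i, i < lo → (ivs.getD i (0, 0)).1 < pos) →
    (∀ i, hi ≤ i → i < ivs.length → ¬ (ivs.getD i (0, 0)).1 < pos) →
    lo ≤ pvLowerBound ivs pos n lo hi ∧ pvLowerBound ivs pos n lo hi ≤ hi ∧
    (∀ i, i < pvLowerBound ivs pos n lo hi → (ivs.getD i (0, 0)).1 < pos) ∧
    (∀ i, pvLowerBound ivs pos n lo hi ≤ i → i < ivs.length → ¬ (ivs.getD i (0, 0)).1 < pos) := by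
  intro n
  induction n with
  | zero =>
    intro lo hi hn hlh hhi hlow hhigh
    have heq : lo = hi := by omega
    simp only [pvLowerBound]
    exact ⟨le_refl _, by omega, hlow, fun i h1 h2 => hhigh i (by omega) h2⟩
  | succ n ih =>
    intro lo hi hn hlh hhi hlow hhigh
    simp only [pvLowerBound]
    by_cases h : lo < hi
    · simp only [h, if_true]
      have hmid : (lo + hi) / 2 < hi := by omega
      have hmidlo : lo ≤ (lo + hi) / 2 := by omega
      have hmidlen : (lo + hi) / 2 < ivs.length := by omega
      rw [PySem.List.pyGetD_natCast]
      by_cases hc : (ivs.getD ((lo + hi) / 2) (0, 0)).1 < pos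
      · simp only [hc, if_true]
        refine (ih ((lo + hi) / 2 + 1) hi (by omega) (by omega) hhi ?_ hhigh).imp (by omega) id
        intro i hi'
        have : (ivs.getD i (0, 0)).1 ≤ (ivs.getD ((lo + hi) / 2) (0, 0)).1 :=
          hmono i _ (by omega) hmidlen
        omega
      · simp only [hc, if_false]
        refine (ih lo ((lo + hi) / 2) (by omega) (by omega) (by omega) hlow ?_).imp id
          (fun h2 => ⟨by omega, h2.2⟩)
        intro i hi' hilen
        have : (ivs.getD ((lo + hi) / 2) (0, 0)).1 ≤ (ivs.getD i (0, 0)).1 :=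
          hmono _ i hi' hilen
        omega
    · simp only [h, if_false]
      exact ⟨le_refl _, by omega, hlow, fun i hi' hlen => hhigh i (by omega) hlen⟩

-- ===== VERDICT (by name: the statement is the Claim_ definition above) =====
theorem locatePos_spec : Claim_equal_locatePos := by
  intro geneExon pos _ _
  unfold Spec_locatePos
  rw [locatePos_eq_if]
  unfold locatePos_alt
  simp only []
  set ps := geneExon.map (fun e => (PySem.List.pyGetD e 0 0 + 1, PySem.List.pyGetD e 1 0)) with hps
  set ivs := PySem.List.sorted ps (fun p => p.1) with hivs
  have hmem : ∀ x : Int × Int, x ∈ ivs ↔ x ∈ ps := by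
    intro x; rw [hivs]; exact PySem.List.mem_sorted ..
  have hlen : ivs.length = ps.length := by rw [hivs]; exact PySem.List.length_sorted ..
  have hmono : ∀ p q : Nat, p ≤ q → q < ivs.length →
      (ivs.getD p (0, 0)).1 ≤ (ivs.getD q (0, 0)).1 := by
    intro p q hpq hq
    have hp : p < ivs.length := by omega
    rw [List.getD_eq_getElem _ _ hp, List.getD_eq_getElem _ _ hq]
    exact PySem.List.key_sorted_getElem_mono ps (fun r => r.1) hpq hq
  obtain ⟨h0, h1, h2, h3⟩ := pvLowerBound_spec ivs pos hmono ivs.length 0 ivs.length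
    (by omega) (by omega) (le_refl _) (by omega) (fun i h h' => absurd h' (by omega))
  set lo := pvLowerBound ivs pos ivs.length 0 ivs.length with hlo
  rw [foldl_eq_pvPm]
  simp only [List.nil_append]
  have key : (0 < lo ∧ pos < PySem.List.pyGetD (pvPm ivs none) ((lo : Int) - 1) 0)
      ↔ (∃ p ∈ ps, p.1 < pos ∧ pos < p.2) := by
    constructor
    · rintro ⟨hpos, hval⟩
      have hidx : ((lo : Int) - 1) = ((lo - 1 : Nat) : Int) := by omega
      rw [hidx, PySem.List.pyGetD_natCast] at hval
      have hk : lo - 1 < ivs.length := by omega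
      obtain (⟨m0, hm0, _⟩ | ⟨i, hik, hlt⟩) := (pvPm_gt pos ivs none (lo - 1) hk).mp hval
      · exact absurd hm0 (by simp)
      · have hiw : i < ivs.length := by omega
        refine ⟨ivs.getD i (0, 0), ?_, h2 i (by omega), hlt⟩
        rw [← hmem, List.getD_eq_getElem _ _ hiw]
        exact List.getElem_mem hiw
    · rintro ⟨p, hp, hs, he⟩
      obtain ⟨i, hiw, hieq⟩ := List.getElem_of_mem ((hmem p).mpr hp)
      have hilo : i < lo := by
        by_contra hge
        exact h3 i (by omega) hiw (by rw [List.getD_eq_getElem _ _ hiw, hieq]; exact hs)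
      refine ⟨by omega, ?_⟩
      have hidx : ((lo : Int) - 1) = ((lo - 1 : Nat) : Int) := by omega
      rw [hidx, PySem.List.pyGetD_natCast]
      have hk : lo - 1 < ivs.length := by omega
      refine (pvPm_gt pos ivs none (lo - 1) hk).mpr (Or.inr ⟨i, by omega, ?_⟩)
      rw [List.getD_eq_getElem _ _ hiw, hieq]; exact he
  have hany : (geneExon.any (fun e =>
      decide (PySem.List.pyGetD e 0 0 + 1 < pos ∧ pos < PySem.List.pyGetD e 1 0)) = true)
      ↔ (∃ p ∈ ps, p.1 < pos ∧ pos < p.2) := by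
    simp [hps, List.any_eq_true]
  by_cases hc : ∃ p ∈ ps, p.1 < pos ∧ pos < p.2
  · rw [if_pos (hany.mpr hc), if_pos (key.mpr hc)]
  · rw [if_neg (fun h => hc (hany.mp h)), if_neg (fun h => hc (key.mp h))]
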